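-- pv_equiv track=rewrite | github.com/yupeijia20010404/Interview-Question | 260206/slide_window.py | max_requests
-- ===== SOURCE A (Python) =====
-- def max_requests(timestamps, window_size):
--     timestamps.sort()
--     l, r = 0, 0
--     max_count = 0
--     while r < len(timestamps):
--         while timestamps[r] - timestamps[l] > window_size - 1:
--             l += 1
--         max_count = max(max_count, r - l + 1)
--         r += 1
--     return max_count
-- ===== SOURCE B (Python) =====
-- import bisect
--
--
-- def max_requests(timestamps, window_size):
--     timestamps.sort()
--     max_count = 0
--     for r in range(len(timestamps)):
--         l = bisect.bisect_left(timestamps, timestamps[r] - window_size + 1)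
--         max_count = max(max_count, r - l + 1)
--     return max_count
-- ===== Notes on version B (the rewrite author's own statement) =====
-- stated objective: idiomatic
-- what changed: Replaces the two-pointer while-loops with a single for-loop that finds each window's left edge by bisect.bisect_left on the sorted list, removing the carried left pointer and the nested while.
-- crash fix: On any non-empty list with window_size <= 0 A's inner while walks the left pointer past the end and raises IndexError; B returns 0 there. — e.g. on max_requests([5], 0): A raises IndexError, B returns 0
import Mathlib
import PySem

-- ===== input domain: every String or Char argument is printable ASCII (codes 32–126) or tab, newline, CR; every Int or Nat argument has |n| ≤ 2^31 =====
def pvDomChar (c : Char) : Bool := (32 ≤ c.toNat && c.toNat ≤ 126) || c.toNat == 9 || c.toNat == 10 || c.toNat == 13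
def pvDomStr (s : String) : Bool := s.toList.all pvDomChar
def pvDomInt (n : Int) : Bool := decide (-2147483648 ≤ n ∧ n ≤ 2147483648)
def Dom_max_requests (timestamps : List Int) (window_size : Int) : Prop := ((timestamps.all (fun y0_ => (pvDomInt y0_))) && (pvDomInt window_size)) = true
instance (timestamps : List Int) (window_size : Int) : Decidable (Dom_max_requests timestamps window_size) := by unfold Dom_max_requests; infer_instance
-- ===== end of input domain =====

-- B replaces A's carried two-pointer scan by an idiomatic per-index bisect_left on the
-- sorted list (same cost class, no speed claim). Both A and B sort the argument IN PLACE,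
-- so the observable mutation is identical; the equivalence proved is about the return value.

-- ===== PORT A =====
-- inner loop: 'while timestamps[r] - timestamps[l] > window_size - 1: l += 1'
-- (fuel-bounded transliteration; fuel = len(timestamps) suffices on Pre_, where l never passes r)
def advA (s : List Int) (w : Int) (r : Int) : Int → Nat → Int
  | l, 0 => l
  | l, fuel+1 =>
      if (PySem.List.pyGet? s r).getD 0 - (PySem.List.pyGet? s l).getD 0 > w - 1 then
        advA s w r (l + 1) fuel
      else l

-- outer loop: 'while r < len(timestamps)'; fuel = len(timestamps) step bound, exact on Pre_
def loopA (s : List Int) (w : Int) : Int → Int → Nat → Nat → Int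
  | _, mc, _, 0 => mc
  | l, mc, r, fuel+1 =>
      if r < s.length then
        let l' := advA s w (r : Int) l s.length
        loopA s w l' (max mc ((r : Int) - l' + 1)) (r + 1) fuel
      else mc

def max_requests (timestamps : List Int) (window_size : Int) : Int :=
  let s := PySem.List.sorted timestamps (fun x => x)
  loopA s window_size 0 0 0 s.length

-- ===== PORT B =====
def max_requests_alt (timestamps : List Int) (window_size : Int) : Int :=
  let s := PySem.List.sorted timestamps (fun x => x)
  (List.range s.length).foldl
    (fun (mc : Int) (r : Nat) =>
      let l := PySem.List.bisectLeft s ((PySem.List.pyGet? s (r : Int)).getD 0 - window_size + 1)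
      max mc ((r : Int) - (l : Int) + 1)) 0

-- ===== PRECONDITION & SPEC =====
-- Pre_ excludes exactly the inputs where A raises: on a non-empty list with window_size ≤ 0
-- the inner while walks l past the last index and timestamps[l] raises IndexError.
def Pre_max_requests (timestamps : List Int) (window_size : Int) : Prop :=
  timestamps = [] ∨ 1 ≤ window_size
instance (timestamps : List Int) (window_size : Int) : Decidable (Pre_max_requests timestamps window_size) := by unfold Pre_max_requests; infer_instance
def pvWitness_max_requests : List Int × Int := ([3, 1, 2, 2], 2)

-- On any non-empty list with window_size ≤ 0 A raises IndexError; B returns 0 there.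
def Raises_max_requests (timestamps : List Int) (window_size : Int) : Prop :=
  timestamps ≠ [] ∧ window_size ≤ 0
instance (timestamps : List Int) (window_size : Int) : Decidable (Raises_max_requests timestamps window_size) := by unfold Raises_max_requests; infer_instance
def pvRaiseWitness_max_requests : List Int × Int := ([5], 0)
def pvRaiseWitnessOut_max_requests : Int := 0

def Spec_max_requests (timestamps : List Int) (window_size : Int) (out : Int) : Prop := out = max_requests_alt timestamps window_size
instance (timestamps : List Int) (window_size : Int) (out : Int) : Decidable (Spec_max_requests timestamps window_size out) := by unfold Spec_max_requests; infer_instance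

-- ===== CLAIM (what is proved, stated in full; the proofs are below) =====
def Claim_equal_max_requests : Prop := ∀ (timestamps : List Int) (window_size : Int), Dom_max_requests timestamps window_size → Pre_max_requests timestamps window_size → Spec_max_requests timestamps window_size (max_requests timestamps window_size)

def Claim_raises_max_requests : Prop := (∀ (timestamps : List Int) (window_size : Int), Dom_max_requests timestamps window_size → Raises_max_requests timestamps window_size → ¬ Pre_max_requests timestamps window_size) ∧ (Dom_max_requests (pvRaiseWitness_max_requests.1) (pvRaiseWitness_max_requests.2) ∧ Raises_max_requests (pvRaiseWitness_max_requests.1) (pvRaiseWitness_max_requests.2) ∧ max_requests_alt (pvRaiseWitness_max_requests.1) (pvRaiseWitness_max_requests.2) = pvRaiseWitnessOut_max_requests)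

-- ===== LEMMAS AND PROOFS =====

-- the left edge B computes at index r (B's foldl body is literally 'max mc (r - Kf s w r + 1)')
def Kf (s : List Int) (w : Int) (r : Nat) : Nat :=
  PySem.List.bisectLeft s ((PySem.List.pyGet? s (r : Int)).getD 0 - w + 1)

lemma pyGetD_at (s : List Int) {r : Nat} (hr : r < s.length) :
    (PySem.List.pyGet? s (r : Int)).getD 0 = s[r] := by
  simp [PySem.List.pyGet?_natCast, List.getElem?_eq_getElem hr]

-- bisectLeft_spec restated for Kf (definitionally the same statement)
lemma Kf_spec (s : List Int) (hs : s.Pairwise (· ≤ ·)) (w : Int) (r : Nat) :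
    Kf s w r ≤ s.length ∧
      (∀ (j : Nat) (hj : j < s.length), j < Kf s w r →
        s[j] < (PySem.List.pyGet? s (r : Int)).getD 0 - w + 1) ∧
      (∀ (j : Nat) (hj : j < s.length), Kf s w r ≤ j →
        (PySem.List.pyGet? s (r : Int)).getD 0 - w + 1 ≤ s[j]) :=
  PySem.List.bisectLeft_spec s ((PySem.List.pyGet? s (r : Int)).getD 0 - w + 1) hs

lemma Kf_le (s : List Int) (hs : s.Pairwise (· ≤ ·)) {w : Int} (hw : 1 ≤ w)
    {r : Nat} (hr : r < s.length) : Kf s w r ≤ r := by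
  by_contra h
  have := (Kf_spec s hs w r).2.1 r hr (by omega)
  rw [pyGetD_at s hr] at this
  omega

lemma Kf_mono (s : List Int) (hs : s.Pairwise (· ≤ ·)) (w : Int)
    {r : Nat} (hr : r + 1 < s.length) : Kf s w r ≤ Kf s w (r + 1) := by
  by_contra h
  have h1 := Kf_spec s hs w r
  have h2 := Kf_spec s hs w (r + 1)
  have hK2n : Kf s w (r + 1) < s.length := by omega
  have hlt := h1.2.1 (Kf s w (r + 1)) hK2n (by omega)
  have hge := h2.2.2 (Kf s w (r + 1)) hK2n (le_refl _)
  rw [pyGetD_at s (by omega : r < s.length)] at hlt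
  rw [pyGetD_at s hr] at hge
  have hmono : s[r] ≤ s[r + 1] :=
    (List.pairwise_iff_getElem.mp hs) r (r + 1) (by omega) hr (by omega)
  omega

lemma advA_eq (s : List Int) (hs : s.Pairwise (· ≤ ·)) {w : Int} (hw : 1 ≤ w)
    {r : Nat} (hr : r < s.length) :
    ∀ (fuel l : Nat), l ≤ Kf s w r → Kf s w r ≤ l + fuel →
      advA s w (r : Int) (l : Int) fuel = (Kf s w r : Int) := by
  have hspec := Kf_spec s hs w r
  intro fuel
  induction fuel with
  | zero =>
      intro l h1 h2
      have : l = Kf s w r := by omega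
      simp [advA, this]
  | succ fuel ih =>
      intro l h1 h2
      have hKr : Kf s w r ≤ r := Kf_le s hs hw hr
      rcases Nat.lt_or_ge l (Kf s w r) with hlt | hge
      · -- condition true: l advances
        have hln : l < s.length := by omega
        have hcond := hspec.2.1 l hln hlt
        have hc : (PySem.List.pyGet? s (r : Int)).getD 0 - (PySem.List.pyGet? s (l : Int)).getD 0 > w - 1 := by
          rw [pyGetD_at s hln]
          omega
        rw [advA, if_pos hc]
        have := ih (l + 1) (by omega) (by omega)
        rwa [show ((l : Int) + 1) = (((l + 1 : Nat)) : Int) by push_cast; ring]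
      · -- l = Kf: condition false, stop
        have hleq : l = Kf s w r := by omega
        have hln : l < s.length := by omega
        have hcond := hspec.2.2 l hln (by omega)
        have hc : ¬ ((PySem.List.pyGet? s (r : Int)).getD 0 - (PySem.List.pyGet? s (l : Int)).getD 0 > w - 1) := by
          rw [pyGetD_at s hln]
          omega
        rw [advA, if_neg hc, hleq]

lemma loopA_eq_fold (s : List Int) (hs : s.Pairwise (· ≤ ·)) {w : Int} (hw : 1 ≤ w) :
    ∀ (fuel r l : Nat) (mc : Int), s.length - r ≤ fuel → (r < s.length → l ≤ Kf s w r) →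
      loopA s w (l : Int) mc r fuel =
        (List.range' r (s.length - r)).foldl
          (fun (mc : Int) (j : Nat) => max mc ((j : Int) - (Kf s w j : Int) + 1)) mc := by
  intro fuel
  induction fuel with
  | zero =>
      intro r l mc hfuel _
      have : s.length - r = 0 := by omega
      simp [loopA, this]
  | succ fuel ih =>
      intro r l mc hfuel hl
      by_cases hr : r < s.length
      · have hKr : Kf s w r ≤ r := Kf_le s hs hw hr
        have hadv : advA s w (r : Int) (l : Int) s.length = (Kf s w r : Int) :=
          advA_eq s hs hw hr s.length l (hl hr) (by omega)
        rw [loopA, if_pos hr]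
        simp only [hadv]
        have hrec := ih (r + 1) (Kf s w r) (max mc ((r : Int) - (Kf s w r : Int) + 1))
          (by omega) (fun h => Kf_mono s hs w h)
        rw [hrec]
        have hd : s.length - r = (s.length - (r + 1)) + 1 := by omega
        rw [hd, List.range'_succ, List.foldl_cons]
      · rw [loopA, if_neg hr]
        have : s.length - r = 0 := by omega
        simp [this]

-- ===== VERDICT (by name: the statement is the Claim_ definition above) =====
theorem max_requests_spec : Claim_equal_max_requests := by
  intro ts w _dom hpre
  unfold Spec_max_requests max_requests max_requests_alt
  rcases hpre with hnil | hw
  · subst hnil; rfl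
  · dsimp only
    obtain ⟨s, hsdef⟩ : ∃ s, PySem.List.sorted ts (fun x => x) = s := ⟨_, rfl⟩
    rw [hsdef]
    have hs : s.Pairwise (· ≤ ·) := by
      rw [← hsdef]; simpa using PySem.List.sorted_pairwise ts (fun x => x)
    have hmain := loopA_eq_fold s hs hw s.length 0 0 0 (le_of_eq rfl) (fun _ => Nat.zero_le _)
    simp only [Nat.cast_zero, Nat.sub_zero] at hmain
    rw [hmain, ← List.range_eq_range']
    rfl
def max_requests_raises : Claim_raises_max_requests := by
  unfold Claim_raises_max_requests
  constructor
  · rintro ts w _ ⟨hne, hle⟩ (h | h)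
    · exact hne h
    · omega
  · exact ⟨by decide, by decide, by decide⟩
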